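-- pv_equiv track=rewrite | github.com/m8e/NAS4Text | libs/utils/data_processing.py | mask_batches
-- ===== SOURCE A (Python) =====
-- import math
--
-- def mask_batches(batch_sampler, shard_id, num_shards):
--     if num_shards == 1:
--         return batch_sampler
--     res = [
--         batch
--         for i, batch in enumerate(batch_sampler)
--         if i % num_shards == shard_id
--     ]
--     expected_length = int(math.ceil(len(batch_sampler) / num_shards))
--     return res + [[]] * (expected_length - len(res))
-- ===== SOURCE B (Python) =====
-- def mask_batches(batch_sampler, shard_id, num_shards):
--     if num_shards == 1:
--         return batch_sampler
--     n = len(batch_sampler)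
--     expected = -(-n // num_shards)
--     if not (0 <= shard_id < num_shards):
--         return [[] for _ in range(expected)]
--     return [
--         batch_sampler[j * num_shards + shard_id] if j * num_shards + shard_id < n else []
--         for j in range(expected)
--     ]
-- ===== Notes on version B (the rewrite author's own statement) =====
-- stated objective: alternative
-- what changed: A filters the input by index modulo and then pads with a separately computed number of empty batches; B computes the output length up front and builds the result in a single pass over output slots, reading batch_sampler[j*num_shards+shard_id] directly (empty list when past the end, all-empty output for an out-of-range shard_id).
-- outside the precondition, e.g. on mask_batches([[1], [2], [3]], -1, -2): A returns [[2]], B returns []; on mask_batches([[1], [2]], 0, 0): A raises ZeroDivisionError, B raises ZeroDivisionError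
import Mathlib
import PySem

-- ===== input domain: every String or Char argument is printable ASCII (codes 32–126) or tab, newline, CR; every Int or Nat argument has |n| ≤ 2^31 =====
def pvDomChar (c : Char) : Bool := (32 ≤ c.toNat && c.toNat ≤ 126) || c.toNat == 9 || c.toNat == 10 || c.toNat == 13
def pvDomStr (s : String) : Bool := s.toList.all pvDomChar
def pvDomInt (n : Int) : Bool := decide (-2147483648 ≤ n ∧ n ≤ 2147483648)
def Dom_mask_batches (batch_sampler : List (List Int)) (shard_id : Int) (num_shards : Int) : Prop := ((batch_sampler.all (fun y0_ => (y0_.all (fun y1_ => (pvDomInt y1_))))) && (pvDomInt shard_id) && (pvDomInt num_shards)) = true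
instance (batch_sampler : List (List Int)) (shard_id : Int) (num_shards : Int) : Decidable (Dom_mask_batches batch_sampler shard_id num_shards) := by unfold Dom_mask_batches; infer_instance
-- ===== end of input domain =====

-- B fuses A's filter-then-pad into one pass over output slots (idx = j*num_shards+shard_id); same cost, different decomposition ("alternative").

-- ===== PORT A =====
-- int(math.ceil(len/num_shards)) is ported as ceiling division -((-n)//ns): exact, since the
-- float quotient n/num_shards rounds across an integer only when n > 2^53, impossible for a list length.
def mask_batches (batch_sampler : List (List Int)) (shard_id : Int) (num_shards : Int) : List (List Int) :=
  if num_shards = 1 then batch_sampler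
  else
    let res := (PySem.List.enumerate batch_sampler).foldl
      (fun acc p => if PySem.Int.mod p.1 num_shards == shard_id then acc ++ [p.2] else acc) []
    let expected := -(PySem.Int.floordiv (-(batch_sampler.length : Int)) num_shards)
    res ++ List.replicate (expected - (res.length : Int)).toNat []

-- ===== PORT B =====
def mask_batches_alt (batch_sampler : List (List Int)) (shard_id : Int) (num_shards : Int) : List (List Int) :=
  if num_shards = 1 then batch_sampler
  else
    let n : Int := batch_sampler.length
    let expected := -(PySem.Int.floordiv (-n) num_shards)
    if 0 ≤ shard_id ∧ shard_id < num_shards then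
      (PySem.List.pyRange 0 expected 1).map
        (fun j => if j * num_shards + shard_id < n
                  then PySem.List.pyGetD batch_sampler (j * num_shards + shard_id) []
                  else [])
    else
      (PySem.List.pyRange 0 expected 1).map (fun _ => [])

-- ===== PRECONDITION & SPEC =====
-- Pre_ restricts to the natural domain of positive shard counts: num_shards = 0 makes A raise
-- ZeroDivisionError, and for negative num_shards A's negative-modulo selection and negative
-- padding length are artefacts outside the natural domain of a shard count.
def Pre_mask_batches (batch_sampler : List (List Int)) (shard_id : Int) (num_shards : Int) : Prop :=
  1 ≤ num_shards
instance (batch_sampler : List (List Int)) (shard_id : Int) (num_shards : Int) : Decidable (Pre_mask_batches batch_sampler shard_id num_shards) := by unfold Pre_mask_batches; infer_instance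

def pvWitness_mask_batches : List (List Int) × Int × Int := ([[1], [2], [3]], 0, 2)

def Spec_mask_batches (batch_sampler : List (List Int)) (shard_id : Int) (num_shards : Int) (out : List (List Int)) : Prop := out = mask_batches_alt batch_sampler shard_id num_shards
instance (batch_sampler : List (List Int)) (shard_id : Int) (num_shards : Int) (out : List (List Int)) : Decidable (Spec_mask_batches batch_sampler shard_id num_shards out) := by unfold Spec_mask_batches; infer_instance

-- ===== CLAIM (what is proved, stated in full; the proofs are below) =====
def Claim_equal_mask_batches : Prop := ∀ (batch_sampler : List (List Int)) (shard_id : Int) (num_shards : Int), Dom_mask_batches batch_sampler shard_id num_shards → Pre_mask_batches batch_sampler shard_id num_shards → Spec_mask_batches batch_sampler shard_id num_shards (mask_batches batch_sampler shard_id num_shards)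

-- ===== LEMMAS AND PROOFS =====

-- A's comprehension as filter-map over enumerate (what the foldl unfolds to).
def selE (ns sh : Int) (l : List (List Int)) (i : Int) : List (List Int) :=
  ((PySem.List.enumerate l i).filter (fun p => PySem.Int.mod p.1 ns == sh)).map Prod.snd

-- common chunked description of both results: one output slot per chunk of m1 input batches
def gsel (m1 s : Nat) : List (List Int) → List (List Int)
  | [] => []
  | a :: t => (a :: t).getD s [] :: gsel m1 s (t.drop (m1 - 1))
termination_by l => l.length
decreasing_by simp

def ceilN (n m1 : Nat) : Nat := (n + m1 - 1) / m1

lemma selE_nil (ns sh i : Int) : selE ns sh [] i = [] := rfl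

lemma selE_cons (ns sh i : Int) (a : List Int) (t : List (List Int)) :
    selE ns sh (a :: t) i =
      if PySem.Int.mod i ns == sh then a :: selE ns sh t (i + 1) else selE ns sh t (i + 1) := by
  simp only [selE, PySem.List.enumerate_cons, List.filter_cons]
  split <;> simp

lemma selE_shift (ns sh : Int) (hns : 0 < ns) :
    ∀ (l : List (List Int)) (i : Int), selE ns sh l (i + ns) = selE ns sh l i := by
  intro l
  induction l with
  | nil => intro i; rfl
  | cons a t ih =>
    intro i
    rw [selE_cons, selE_cons]
    have hmod : PySem.Int.mod (i + ns) ns = PySem.Int.mod i ns := by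
      rw [PySem.Int.mod_eq_emod_of_pos hns, PySem.Int.mod_eq_emod_of_pos hns,
        show i + ns = i + ns * 1 by ring, Int.add_mul_emod_self_left]
    have ht : i + ns + 1 = (i + 1) + ns := by ring
    rw [hmod, ht, ih]

lemma selE_append (ns sh : Int) :
    ∀ (a b : List (List Int)) (i : Int),
      selE ns sh (a ++ b) i = selE ns sh a i ++ selE ns sh b (i + a.length) := by
  intro a
  induction a with
  | nil => intro b i; simp [selE_nil]
  | cons x t ih =>
    intro b i
    rw [List.cons_append, selE_cons, selE_cons, ih]
    have ht : i + 1 + (t.length : Int) = i + ((x :: t).length : Int) := by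
      simp; ring
    rw [ht]
    split <;> simp

lemma selE_base (ns sh : Int) (hns : 0 < ns) (hsh0 : 0 ≤ sh) (hsh : sh < ns) :
    ∀ (l : List (List Int)) (k : Nat), k + l.length ≤ ns.toNat →
      selE ns sh l k =
        if k ≤ sh.toNat ∧ sh.toNat < k + l.length then [l.getD (sh.toNat - k) []] else [] := by
  intro l
  induction l with
  | nil =>
    intro k hk
    rw [selE_nil, if_neg]; simp
  | cons a t ih =>
    intro k hk
    have hklt : (k : Int) < ns := by
      have : k < ns.toNat := by simp at hk; omega
      omega
    have hmod : PySem.Int.mod (k : Int) ns = (k : Int) := by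
      rw [PySem.Int.mod_eq_emod_of_pos hns, Int.emod_eq_of_lt (by omega) hklt]
    rw [selE_cons, hmod]
    have hcast : ((k : Int) + 1) = ((k + 1 : Nat) : Int) := by push_cast; ring
    by_cases he : (k : Int) = sh
    · have hks : k = sh.toNat := by omega
      rw [if_pos (by simp [he]), hcast, ih (k + 1) (by simp at hk ⊢; omega)]
      rw [if_neg (by omega), if_pos (by simp; omega)]
      simp [hks]
    · rw [if_neg (by simp [he]), hcast, ih (k + 1) (by simp at hk ⊢; omega)]
      have hkne : k ≠ sh.toNat := by omega
      by_cases hc : k + 1 ≤ sh.toNat ∧ sh.toNat < k + 1 + t.length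
      · rw [if_pos hc, if_pos (by simp at hc ⊢; omega)]
        have : sh.toNat - k = (sh.toNat - (k + 1)) + 1 := by omega
        rw [this, List.getD_cons_succ]
      · rw [if_neg hc, if_neg (by simp at hc ⊢; omega)]

lemma selE_chunk (ns sh : Int) (hns : 0 < ns) (hsh0 : 0 ≤ sh) (hsh : sh < ns)
    (l : List (List Int)) :
    selE ns sh l 0 =
      (if sh.toNat < l.length then [l.getD sh.toNat []] else []) ++
        selE ns sh (l.drop ns.toNat) 0 := by
  set m1 := ns.toNat with hm1
  have hm1ns : (m1 : Int) = ns := Int.toNat_of_nonneg (by omega)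
  have hs : sh.toNat < m1 := by omega
  have e0 : ((0 : Nat) : Int) = 0 := rfl
  conv_lhs => rw [← List.take_append_drop m1 l]
  rw [selE_append]
  rcases Nat.lt_or_ge m1 l.length with hlt | hle
  · have hlen : (l.take m1).length = m1 := by simp [Nat.le_of_lt hlt]
    have hbase := selE_base ns sh hns hsh0 hsh (l.take m1) 0 (by omega)
    rw [e0, if_pos (by omega), Nat.sub_zero] at hbase
    rw [hbase]
    have h0 : (0 : Int) + ((l.take m1).length : Int) = 0 + ns := by rw [hlen, hm1ns]
    rw [h0, selE_shift ns sh hns, if_pos (by omega)]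
    have hgd : (l.take m1).getD sh.toNat [] = l.getD sh.toNat [] := by
      rw [List.getD_eq_getElem _ _ (by omega), List.getD_eq_getElem _ _ (by omega)]
      exact List.getElem_take
    rw [hgd]
  · rw [List.drop_eq_nil_of_le hle, List.take_of_length_le hle, selE_nil, List.append_nil]
    have hbase := selE_base ns sh hns hsh0 hsh l 0 (by omega)
    rw [e0, Nat.sub_zero] at hbase
    rw [hbase, selE_nil, List.append_nil]
    split_ifs with h1 h2 h2 <;> first | rfl | omega

lemma ceilN_zero (m1 : Nat) (hm : 1 ≤ m1) : ceilN 0 m1 = 0 := by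
  unfold ceilN; exact Nat.div_eq_of_lt (by omega)

lemma ceilN_succ (n m1 : Nat) (hm : 1 ≤ m1) (hn : 1 ≤ n) :
    ceilN n m1 = ceilN (n - m1) m1 + 1 := by
  unfold ceilN
  rcases Nat.lt_or_ge m1 n with hlt | hle
  case inr =>
    rw [Nat.sub_eq_zero_of_le hle]
    have h2 : (0 + m1 - 1) / m1 = 0 := Nat.div_eq_of_lt (by omega)
    have h1 : (n + m1 - 1) / m1 = 1 := Nat.div_eq_of_lt_le (by omega) (by omega)
    rw [h1, h2]
  case inl =>
    have h1 : n + m1 - 1 = (n - m1 + m1 - 1) + m1 := by omega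
    rw [h1, Nat.add_div_right _ (by omega)]

lemma ceil_eq (ns : Int) (hns : 0 < ns) (n : Nat) :
    -(PySem.Int.floordiv (-(n : Int)) ns) = (ceilN n ns.toNat : Int) := by
  rw [PySem.Int.neg_floordiv_neg_eq_iff_of_pos hns]
  set m1 := ns.toNat with hm1
  have hm1ns : (m1 : Int) = ns := Int.toNat_of_nonneg (by omega)
  have hm : 1 ≤ m1 := by omega
  have hdm := Nat.div_add_mod (n + m1 - 1) m1
  have hr : (n + m1 - 1) % m1 < m1 := Nat.mod_lt _ (by omega)
  set d := (n + m1 - 1) / m1 with hd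
  set r := (n + m1 - 1) % m1 with hrr
  have key : (m1 : Int) * d + r = (n : Int) + m1 - 1 := by
    have : m1 * d + r = n + m1 - 1 := hdm
    omega
  have hceil : ceilN n m1 = d := rfl
  rw [hceil]
  have hrz : (0:Int) ≤ (r:Int) := Int.natCast_nonneg r
  have hrlt : (r:Int) < (m1:Int) := by exact_mod_cast hr
  constructor
  · nlinarith [key, hrlt]
  · nlinarith [key, hrz]

lemma selE_to_gsel (ns sh : Int) (hns : 0 < ns) (hsh0 : 0 ≤ sh) (hsh : sh < ns) :
    ∀ (l : List (List Int)),
      selE ns sh l 0 ++ List.replicate (ceilN l.length ns.toNat - (selE ns sh l 0).length) [] =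
        gsel ns.toNat sh.toNat l := by
  set m1 := ns.toNat with hm1
  have hm1ns : (m1 : Int) = ns := Int.toNat_of_nonneg (by omega)
  have hm : 1 ≤ m1 := by omega
  have hs : sh.toNat < m1 := by omega
  suffices H : ∀ (N : Nat) (l : List (List Int)), l.length ≤ N →
      selE ns sh l 0 ++ List.replicate (ceilN l.length m1 - (selE ns sh l 0).length) [] =
        gsel m1 sh.toNat l by
    intro l; exact H l.length l le_rfl
  intro N
  induction N with
  | zero =>
    intro l hl
    have : l = [] := List.eq_nil_of_length_eq_zero (by omega)
    subst this
    simp [selE_nil, gsel, ceilN_zero m1 hm]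
  | succ N ih =>
    intro l hl
    match l with
    | [] => simp [selE_nil, gsel, ceilN_zero m1 hm]
    | a :: t =>
      obtain ⟨k, hk⟩ : ∃ k, m1 = k + 1 := ⟨m1 - 1, by omega⟩
      have hdrop : (a :: t).drop m1 = t.drop (m1 - 1) := by
        rw [hk]; simp
      have hchunk := selE_chunk ns sh hns hsh0 hsh (a :: t)
      rw [← hm1, hdrop] at hchunk
      have hdl : (t.drop (m1 - 1)).length = (a :: t).length - m1 := by
        simp; omega
      have hceil : ceilN (a :: t).length m1 = ceilN ((a :: t).length - m1) m1 + 1 :=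
        ceilN_succ _ _ hm (by simp)
      have ihd := ih (t.drop (m1 - 1)) (by simp at hl ⊢; omega)
      rcases Nat.lt_or_ge sh.toNat (a :: t).length with hsn | hsn
      · rw [if_pos hsn] at hchunk
        rw [hchunk]
        show (a :: t).getD sh.toNat [] :: _ = _
        rw [gsel]
        congr 1
        rw [← ihd, hdl]
        have harith : ceilN (a :: t).length m1 -
            ([(a :: t).getD sh.toNat []] ++ selE ns sh (t.drop (m1 - 1)) 0).length =
            ceilN ((a :: t).length - m1) m1 - (selE ns sh (t.drop (m1 - 1)) 0).length := by
          simp only [List.length_append, List.length_cons, List.length_nil]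
          simp only [List.length_cons] at hceil
          omega
        rw [harith]
        simp
      · -- sh.toNat ≥ length: selection empty, single padding slot
        rw [if_neg (by omega)] at hchunk
        have hnm : (a :: t).length ≤ m1 := by omega
        have hdnil : t.drop (m1 - 1) = [] := List.drop_eq_nil_of_le (by simp at hnm ⊢; omega)
        rw [hdnil, selE_nil, List.nil_append] at hchunk
        rw [hchunk]
        rw [gsel, hdnil, gsel]
        have hc1 : ceilN (a :: t).length m1 = 1 := by
          rw [hceil, Nat.sub_eq_zero_of_le hnm, ceilN_zero m1 hm]
        have hge : (a :: t)[sh.toNat]? = none :=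
          List.getElem?_eq_none (by omega : (a :: t).length ≤ sh.toNat)
        simp only [List.length_cons] at hc1
        simp [hc1, hge]

lemma slots_to_gsel (ns sh : Int) (hns : 0 < ns) (hsh0 : 0 ≤ sh) (hsh : sh < ns) :
    ∀ (l : List (List Int)),
      (List.range (ceilN l.length ns.toNat)).map
          (fun j : Nat => if (j : Int) * ns + sh < (l.length : Int)
                          then PySem.List.pyGetD l ((j : Int) * ns + sh) [] else []) =
        gsel ns.toNat sh.toNat l := by
  set m1 := ns.toNat with hm1
  have hm1ns : (m1 : Int) = ns := Int.toNat_of_nonneg (by omega)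
  have hm : 1 ≤ m1 := by omega
  have hs : sh.toNat < m1 := by omega
  suffices H : ∀ (N : Nat) (l : List (List Int)), l.length ≤ N →
      (List.range (ceilN l.length m1)).map
          (fun j : Nat => if (j : Int) * ns + sh < (l.length : Int)
                          then PySem.List.pyGetD l ((j : Int) * ns + sh) [] else []) =
        gsel m1 sh.toNat l by
    intro l; exact H l.length l le_rfl
  intro N
  induction N with
  | zero =>
    intro l hl
    have : l = [] := List.eq_nil_of_length_eq_zero (by omega)
    subst this
    simp [gsel, ceilN_zero m1 hm]
  | succ N ih =>
    intro l hl
    match l with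
    | [] => simp [gsel, ceilN_zero m1 hm]
    | a :: t =>
      obtain ⟨k, hk⟩ : ∃ k, m1 = k + 1 := ⟨m1 - 1, by omega⟩
      have hceil : ceilN (a :: t).length m1 = ceilN ((a :: t).length - m1) m1 + 1 :=
        ceilN_succ _ _ hm (by simp)
      have hdl : (t.drop (m1 - 1)).length = (a :: t).length - m1 := by simp; omega
      rw [hceil, List.range_succ_eq_map, List.map_cons, List.map_map]
      rw [gsel]
      congr 1
      · -- head slot
        have h00 : ((0 : Nat) : Int) * ns + sh = sh := by push_cast; ring
        rw [h00]
        rcases Nat.lt_or_ge sh.toNat (a :: t).length with hsn | hsn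
        · rw [if_pos (by omega), PySem.List.pyGetD_eq_getElem _ _ hsh0 (by exact_mod_cast by omega),
            List.getD_eq_getElem _ _ hsn]
        · rw [if_neg (by omega), List.getD_eq_default _ _ (by omega)]
      · -- tail slots
        rw [← ih (t.drop (m1 - 1)) (by simp at hl ⊢; omega), hdl]
        apply List.map_congr_left
        intro j hj
        simp only [Function.comp_apply]
        have hsucc : ((Nat.succ j : Nat) : Int) * ns + sh = ((j : Int) * ns + sh) + ns := by
          push_cast; ring
        rw [hsucc]
        have hjns : (0 : Int) ≤ (j : Int) * ns := by positivity
        rcases Nat.lt_or_ge (a :: t).length m1 with hlt | hge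
        · -- list shorter than one chunk: both slots empty
          rw [if_neg (by omega), if_neg (by rw [Nat.sub_eq_zero_of_le (by omega)]; push_cast; omega)]
        · have hcast : (((a :: t).length - m1 : Nat) : Int) = ((a :: t).length : Int) - ns := by
            push_cast [Nat.cast_sub hge]; omega
          by_cases hcond : (j : Int) * ns + sh + ns < ((a :: t).length : Int)
          · rw [if_pos hcond, if_pos (by rw [hcast]; omega)]
            have h0a : (0 : Int) ≤ (j : Int) * ns + sh + ns := by omega
            have h0b : (0 : Int) ≤ (j : Int) * ns + sh := by omega
            rw [PySem.List.pyGetD_eq_getElem _ _ h0a (by omega),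
              PySem.List.pyGetD_eq_getElem _ _ h0b (by rw [hdl]; push_cast [Nat.cast_sub hge]; omega)]
            apply Option.some.inj
            rw [← List.getElem?_eq_getElem, ← List.getElem?_eq_getElem, List.getElem?_drop]
            have hidx : ((j : Int) * ns + sh + ns).toNat =
                (m1 - 1 + ((j : Int) * ns + sh).toNat) + 1 := by omega
            rw [hidx, List.getElem?_cons_succ]
          · rw [if_neg hcond, if_neg (by rw [hcast]; omega)]

lemma selE_empty (ns sh : Int) (hns : 0 < ns) (h : ¬ (0 ≤ sh ∧ sh < ns)) :
    ∀ (l : List (List Int)) (i : Int), selE ns sh l i = [] := by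
  intro l
  induction l with
  | nil => intro i; rfl
  | cons a t ih =>
    intro i
    rw [selE_cons, if_neg, ih]
    intro hc
    have : PySem.Int.mod i ns = sh := by exact_mod_cast beq_iff_eq.mp hc
    have h0 := PySem.Int.mod_nonneg i hns
    have h1 := PySem.Int.mod_lt i hns
    exact h (by omega)

-- ===== VERDICT (by name: the statement is the Claim_ definition above) =====
theorem mask_batches_spec : Claim_equal_mask_batches := by
  intro bs sh ns hdom hpre
  have hns : 0 < ns := by
    have h := hpre; unfold Pre_mask_batches at h; omega
  unfold Spec_mask_batches mask_batches mask_batches_alt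
  by_cases h1 : ns = 1
  · simp [h1]
  · rw [if_neg h1, if_neg h1]
    simp only [PySem.List.foldl_append_if, List.nil_append]
    have hsel : List.map Prod.snd
        (List.filter (fun x => PySem.Int.mod x.1 ns == sh) (PySem.List.enumerate bs)) =
        selE ns sh bs 0 := rfl
    rw [hsel, ceil_eq ns hns bs.length]
    by_cases hr : 0 ≤ sh ∧ sh < ns
    · rw [if_pos hr]
      obtain ⟨hsh0, hshlt⟩ := hr
      rw [show ((ceilN bs.length ns.toNat : Int) - ((selE ns sh bs 0).length : Int)).toNat =
            ceilN bs.length ns.toNat - (selE ns sh bs 0).length from Int.toNat_sub _ _]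
      rw [selE_to_gsel ns sh hns hsh0 hshlt bs]
      rw [PySem.List.pyRange_one, List.map_map]
      simp only [sub_zero, zero_add, Int.toNat_natCast]
      exact (slots_to_gsel ns sh hns hsh0 hshlt bs).symm
    · rw [if_neg hr]
      rw [selE_empty ns sh hns hr bs 0]
      rw [PySem.List.pyRange_one, List.map_map]
      simp [Function.comp_def]
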